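-- pv_equiv track=rewrite | github.com/RainMaker1707/LINFO1002A_projet2_groupe_E6 | scripts/makeGraph.py | inter_fun_y_axe
-- ===== SOURCE A (Python) =====
-- def inter_fun_y_axe(top_list):
--     """
--     :param top_list:
--     :return:
--     """
--     top_list.reverse()
--     x_axe = [0 for _ in range(len(top_list))]
--     length = len(top_list)
--     lst = []
--     for i in range(len(top_list)):
--         if i % 2 == 0:
--             x_axe[int(i / 2)] = top_list[i]
--         else:
--             x_axe[- int(i / 2 + 0.5)] = top_list[i]
--         if i > 0 and top_list[i][0] == top_list[i - 1][0]:
--             length -= 1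
--         else:
--             lst.append(top_list[i][0])
--     lst.reverse()
--     return x_axe, length, lst
-- ===== SOURCE B (Python) =====
-- def inter_fun_y_axe(top_list):
--     # Closed-form slicing construction instead of per-index even/odd scatter;
--     # run-count in a single separate pass. Mutates top_list in place (reverse), like A.
--     top_list.reverse()
--     x_axe = top_list[0::2] + top_list[1::2][::-1]
--     lst = []
--     for row in top_list:
--         if not lst or lst[-1] != row[0]:
--             lst.append(row[0])
--     length = len(lst)
--     lst.reverse()
--     return x_axe, length, lst
-- ===== Notes on version B (the rewrite author's own statement) =====
-- stated objective: simpler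
-- what changed: Replaces the per-index even/odd scatter into a preallocated array by a closed-form slicing construction (evens + reversed odds) and computes the run labels/count in one plain pass over the list, taking length = len(lst) instead of decrementing a counter.
import Mathlib
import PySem

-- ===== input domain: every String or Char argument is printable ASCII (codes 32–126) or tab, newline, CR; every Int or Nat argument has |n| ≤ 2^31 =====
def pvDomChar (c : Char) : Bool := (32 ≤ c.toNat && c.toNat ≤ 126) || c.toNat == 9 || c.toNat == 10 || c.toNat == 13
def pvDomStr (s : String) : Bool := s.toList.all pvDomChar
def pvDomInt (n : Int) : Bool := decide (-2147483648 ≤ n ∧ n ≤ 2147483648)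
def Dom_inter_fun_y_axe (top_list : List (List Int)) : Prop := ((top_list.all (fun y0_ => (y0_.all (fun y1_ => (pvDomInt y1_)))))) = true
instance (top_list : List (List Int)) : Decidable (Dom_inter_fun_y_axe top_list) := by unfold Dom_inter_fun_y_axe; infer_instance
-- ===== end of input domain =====

-- B replaces A's per-index even/odd scatter into a preallocated list by a closed-form
-- evens-plus-reversed-odds construction, and collects the run labels in one separate pass
-- (length = number of labels) — a simpler decomposition of the same O(n) task.
-- In Python both A and B reverse their argument in place; the equivalence proved here is
-- about the return value (B performs the same mutation as A).


-- ===== PORT A =====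
-- the first if of the loop body: x_axe[int(i/2)] = top_list[i]  /  x_axe[-int(i/2+0.5)] = top_list[i]
-- (for odd i, int(i/2+0.5) = i/2 + 1, and the negative index -m on a length-n list is n - m;
--  Python's int placeholders 0 in x_axe are modelled by [] — every slot is overwritten before return)
def pvStepX (tl : List (List Int)) (n : Nat) (x : List (List Int)) (i : Nat) : List (List Int) :=
  if i % 2 = 0 then x.set (i / 2) (tl.getD i [])
  else x.set (n - (i / 2 + 1)) (tl.getD i [])

-- the second if of the loop body; top_list[i][0] is (tl.getD i []).headD 0, exact under Pre_
def pvStepL (tl : List (List Int)) (s : Int × List Int) (i : Nat) : Int × List Int :=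
  if 0 < i ∧ (tl.getD i []).headD 0 = (tl.getD (i - 1) []).headD 0
  then (s.1 - 1, s.2)
  else (s.1, s.2 ++ [(tl.getD i []).headD 0])

def inter_fun_y_axe (top_list : List (List Int)) : List (List Int) × Int × List Int :=
  let tl := top_list.reverse
  let n := tl.length
  let st := (List.range n).foldl
    (fun (st : List (List Int) × Int × List Int) i =>
      (pvStepX tl n st.1 i, pvStepL tl st.2 i))
    (List.replicate n ([] : List Int), ((n : Int), ([] : List Int)))
  (st.1, st.2.1, st.2.2.reverse)

-- ===== PORT B =====
-- tl[0::2]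
def pvEvens : List (List Int) → List (List Int)
  | [] => []
  | [a] => [a]
  | a :: _ :: rest => a :: pvEvens rest

-- tl[1::2]
def pvOdds : List (List Int) → List (List Int)
  | [] => []
  | [_] => []
  | _ :: b :: rest => b :: pvOdds rest

-- if not lst or lst[-1] != row[0]: lst.append(row[0])   (row[0] exact under Pre_)
def pvRunStep (lst : List Int) (row : List Int) : List Int :=
  if lst = [] ∨ lst.getLast? ≠ some (row.headD 0) then lst ++ [row.headD 0] else lst

def inter_fun_y_axe_alt (top_list : List (List Int)) : List (List Int) × Int × List Int :=
  let tl := top_list.reverse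
  let x_axe := pvEvens tl ++ (pvOdds tl).reverse
  let lst := tl.foldl pvRunStep []
  (x_axe, ((lst.length : Int), lst.reverse))

-- ===== PRECONDITION & SPEC =====
-- Pre_ excludes inputs containing an empty inner list: on those Python A raises IndexError
-- at top_list[i][0] (Python B raises there likewise, at row[0]).
def Pre_inter_fun_y_axe (top_list : List (List Int)) : Prop := ¬ ([] ∈ top_list)
instance (top_list : List (List Int)) : Decidable (Pre_inter_fun_y_axe top_list) := by unfold Pre_inter_fun_y_axe; infer_instance
def pvWitness_inter_fun_y_axe : List (List Int) := [[3, 1], [3, 2], [5, 0]]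

def Spec_inter_fun_y_axe (top_list : List (List Int)) (out : List (List Int) × Int × List Int) : Prop := out = inter_fun_y_axe_alt top_list
instance (top_list : List (List Int)) (out : List (List Int) × Int × List Int) : Decidable (Spec_inter_fun_y_axe top_list out) := by unfold Spec_inter_fun_y_axe; infer_instance

-- ===== CLAIM (what is proved, stated in full; the proofs are below) =====
def Claim_equal_inter_fun_y_axe : Prop := ∀ (top_list : List (List Int)), Dom_inter_fun_y_axe top_list → Pre_inter_fun_y_axe top_list → Spec_inter_fun_y_axe top_list (inter_fun_y_axe top_list)

-- ===== LEMMAS AND PROOFS =====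

-- a fold over a product state whose components are updated independently splits in two
theorem pv_foldl_pair {α β γ : Type} (f : α → γ → α) (g : β → γ → β) (l : List γ)
    (a : α) (b : β) :
    l.foldl (fun p c => (f p.1 c, g p.2 c)) (a, b) = (l.foldl f a, l.foldl g b) := by
  induction l generalizing a b with
  | nil => rfl
  | cons x xs ih => simp [List.foldl, ih]

-- ----- the (length, lst) component: A's counter fold equals B's run-label pass -----

theorem pv_Lpart (tl : List (List Int)) :
    ∀ k, k ≤ tl.length →
      (List.range k).foldl (pvStepL tl) (((tl.length : Int)), []) =
        ((tl.length : Int) - k + ((tl.take k).foldl pvRunStep []).length,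
         (tl.take k).foldl pvRunStep []) ∧
      (0 < k → ((tl.take k).foldl pvRunStep []).getLast? =
        some ((tl.getD (k - 1) []).headD 0)) := by
  intro k
  induction k with
  | zero => intro _; simp
  | succ k ih =>
    intro hk
    have hklt : k < tl.length := by omega
    obtain ⟨ih1, ih2⟩ := ih (by omega)
    have htake : tl.take (k + 1) = tl.take k ++ [tl.getD k []] := by
      rw [List.take_succ, List.getD_eq_getElem?_getD, List.getElem?_eq_getElem hklt]
      rfl
    have hfold : (tl.take (k + 1)).foldl pvRunStep [] =
        pvRunStep ((tl.take k).foldl pvRunStep []) (tl.getD k []) := by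
      rw [htake, List.foldl_append]; rfl
    have hrange : (List.range (k + 1)).foldl (pvStepL tl) (((tl.length : Int)), []) =
        pvStepL tl ((List.range k).foldl (pvStepL tl) (((tl.length : Int)), [])) k := by
      rw [List.range_succ, List.foldl_append]; rfl
    rw [hrange, ih1, hfold]
    set L := (tl.take k).foldl pvRunStep [] with hL
    rcases Nat.eq_zero_or_pos k with hk0 | hkpos
    · subst hk0
      have hL0 : L = [] := by simp [hL]
      rw [hL0]
      refine ⟨?_, ?_⟩
      · simp [pvStepL, pvRunStep]
      · intro _; simp [pvRunStep]
    · have hlast := ih2 hkpos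
      have hLne : L ≠ [] := by intro h; rw [h] at hlast; simp at hlast
      by_cases heq : (tl.getD k []).headD 0 = (tl.getD (k - 1) []).headD 0
      · have hrun : pvRunStep L (tl.getD k []) = L := by
          unfold pvRunStep
          rw [if_neg]
          push_neg
          exact ⟨hLne, by rw [hlast, heq]⟩
        rw [hrun]
        refine ⟨?_, ?_⟩
        · unfold pvStepL
          rw [if_pos ⟨hkpos, heq⟩]
          simp; omega
        · intro _
          simp only [Nat.add_sub_cancel]
          rw [← heq] at hlast
          exact hlast
      · have hrun : pvRunStep L (tl.getD k []) = L ++ [(tl.getD k []).headD 0] := by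
          unfold pvRunStep
          rw [if_pos (Or.inr (by
            rw [hlast]
            simp only [ne_eq, Option.some.injEq]
            exact fun h => heq h.symm))]
        rw [hrun]
        refine ⟨?_, ?_⟩
        · unfold pvStepL
          rw [if_neg (fun h => heq h.2)]
          simp; omega
        · intro _; simp

-- ----- the x_axe component: A's scatter equals evens ++ reversed odds, elementwise -----

-- inverse of A's scatter position map: the source index written to slot j
def pvInv (n j : Nat) : Nat := if 2 * j < n then 2 * j else 2 * (n - j) - 1

theorem pv_pos_iff (n k j : Nat) (hk : k < n) (hj : j < n) :
    ((if k % 2 = 0 then k / 2 else n - (k / 2 + 1)) = j) ↔ pvInv n j = k := by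
  unfold pvInv; split_ifs <;> omega

theorem pv_X_length (tl : List (List Int)) (n : Nat) (k : Nat) :
    ((List.range k).foldl (pvStepX tl n) (List.replicate n [])).length = n := by
  induction k with
  | zero => simp
  | succ k ih =>
    rw [List.range_succ, List.foldl_append]
    simp only [List.foldl_cons, List.foldl_nil]
    have hstep : ∀ x, (pvStepX tl n x k).length = x.length := by
      intro x; unfold pvStepX; split_ifs <;> simp
    rw [hstep, ih]

theorem pv_X_get (tl : List (List Int)) (n : Nat) :
    ∀ k, k ≤ n → ∀ j, j < n →
      ((List.range k).foldl (pvStepX tl n) (List.replicate n []))[j]? =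
        (if pvInv n j < k then some (tl.getD (pvInv n j) []) else some []) := by
  intro k
  induction k with
  | zero =>
    intro _ j hj
    simp [hj]
  | succ k ih =>
    intro hk j hj
    have hklt : k < n := by omega
    rw [List.range_succ, List.foldl_append]
    simp only [List.foldl_cons, List.foldl_nil]
    set prev := (List.range k).foldl (pvStepX tl n) (List.replicate n []) with hprev
    have hlen : prev.length = n := pv_X_length tl n k
    have hstep : pvStepX tl n prev k =
        prev.set (if k % 2 = 0 then k / 2 else n - (k / 2 + 1)) (tl.getD k []) := by
      unfold pvStepX; split_ifs <;> rfl
    rw [hstep]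
    by_cases hje : (if k % 2 = 0 then k / 2 else n - (k / 2 + 1)) = j
    · have hinv : pvInv n j = k := (pv_pos_iff n k j hklt hj).mp hje
      rw [hje, List.getElem?_set_self (by omega)]
      rw [hinv]
      simp
    · have hinv : pvInv n j ≠ k := fun h => hje ((pv_pos_iff n k j hklt hj).mpr h)
      rw [List.getElem?_set_ne hje, ih hklt.le j hj]
      by_cases h2 : pvInv n j < k
      · rw [if_pos h2, if_pos (by omega)]
      · rw [if_neg h2, if_neg (by omega)]

theorem pvEvens_length (l : List (List Int)) : (pvEvens l).length = (l.length + 1) / 2 := by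
  induction l using pvEvens.induct with
  | case1 => simp [pvEvens]
  | case2 a => simp [pvEvens]
  | case3 a b rest ih => simp [pvEvens, ih]; omega

theorem pvOdds_length (l : List (List Int)) : (pvOdds l).length = l.length / 2 := by
  induction l using pvOdds.induct with
  | case1 => simp [pvOdds]
  | case2 a => simp [pvOdds]
  | case3 a b rest ih => simp [pvOdds, ih]; omega

theorem pvEvens_get (l : List (List Int)) : ∀ j, (pvEvens l)[j]? = l[2 * j]? := by
  induction l using pvEvens.induct with
  | case1 => intro j; simp [pvEvens]
  | case2 a =>
    intro j
    match j with
    | 0 => simp [pvEvens]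
    | j + 1 => simp [pvEvens]
  | case3 a b rest ih =>
    intro j
    match j with
    | 0 => simp [pvEvens]
    | j + 1 =>
      show (pvEvens (a :: b :: rest))[j + 1]? = _
      have : pvEvens (a :: b :: rest) = a :: pvEvens rest := rfl
      rw [this, List.getElem?_cons_succ, ih j]
      have h2 : 2 * (j + 1) = (2 * j + 1) + 1 := by omega
      rw [h2, List.getElem?_cons_succ, List.getElem?_cons_succ]

theorem pvOdds_get (l : List (List Int)) : ∀ j, (pvOdds l)[j]? = l[2 * j + 1]? := by
  induction l using pvOdds.induct with
  | case1 => intro j; simp [pvOdds]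
  | case2 a =>
    intro j
    simp [pvOdds]
  | case3 a b rest ih =>
    intro j
    match j with
    | 0 => simp [pvOdds]
    | j + 1 =>
      have : pvOdds (a :: b :: rest) = b :: pvOdds rest := rfl
      rw [this, List.getElem?_cons_succ, ih j]
      have h2 : 2 * (j + 1) + 1 = (2 * j + 1) + 1 + 1 := by omega
      rw [h2, List.getElem?_cons_succ, List.getElem?_cons_succ]

theorem pv_B_get (tl : List (List Int)) (j : Nat) (hj : j < tl.length) :
    (pvEvens tl ++ (pvOdds tl).reverse)[j]? = some (tl.getD (pvInv tl.length j) []) := by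
  set n := tl.length with hn
  have hel : (pvEvens tl).length = (n + 1) / 2 := pvEvens_length tl
  have hol : (pvOdds tl).length = n / 2 := pvOdds_length tl
  by_cases hcase : j < (n + 1) / 2
  · rw [List.getElem?_append_left (by omega), pvEvens_get tl j]
    have h2j : 2 * j < n := by omega
    have hinv : pvInv n j = 2 * j := by unfold pvInv; rw [if_pos h2j]
    rw [hinv, List.getD_eq_getElem?_getD, List.getElem?_eq_getElem h2j]
    rfl
  · rw [List.getElem?_append_right (by omega)]
    rw [List.getElem?_reverse (by simp [hol]; omega)]
    rw [hol, hel, pvOdds_get]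
    have hidx : 2 * (n / 2 - 1 - (j - (n + 1) / 2)) + 1 = 2 * (n - j) - 1 := by omega
    have hinv : pvInv n j = 2 * (n - j) - 1 := by unfold pvInv; rw [if_neg (by omega)]
    rw [hidx, hinv]
    have hlt : 2 * (n - j) - 1 < n := by omega
    rw [List.getD_eq_getElem?_getD, List.getElem?_eq_getElem hlt]
    rfl

theorem pv_X_eq (tl : List (List Int)) :
    (List.range tl.length).foldl (pvStepX tl tl.length) (List.replicate tl.length []) =
      pvEvens tl ++ (pvOdds tl).reverse := by
  apply List.ext_getElem?
  intro j
  by_cases hj : j < tl.length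
  · rw [pv_X_get tl tl.length tl.length le_rfl j hj, pv_B_get tl j hj]
    rw [if_pos (by unfold pvInv; split_ifs <;> omega)]
  · rw [List.getElem?_eq_none (by rw [pv_X_length]; omega)]
    rw [List.getElem?_eq_none (by simp [pvEvens_length, pvOdds_length]; omega)]

-- ===== VERDICT (by name: the statement is the Claim_ definition above) =====
theorem inter_fun_y_axe_spec : Claim_equal_inter_fun_y_axe := by
  intro top_list _ _
  unfold Spec_inter_fun_y_axe inter_fun_y_axe inter_fun_y_axe_alt
  simp only
  set tl := top_list.reverse with htl
  rw [pv_foldl_pair (pvStepX tl tl.length) (pvStepL tl)]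
  obtain ⟨hl, -⟩ := pv_Lpart tl tl.length le_rfl
  rw [List.take_length] at hl
  rw [hl, pv_X_eq]
  refine Prod.ext rfl (Prod.ext ?_ rfl)
  simp
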